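-- pv_equiv track=rewrite | github.com/GarrettXUPT/boolean_fuction | non-absolute/non_absolute_indicator114.py | EightVarsAddMol
-- ===== SOURCE A (Python) =====
-- def EightVarsAddMol(dicOfw):
--     dicOfValue = {"x1" : 0, "x2" : 0, "x3" : 0, "x4" : 0, "x5" : 0, "x6" : 0, "x7" : 0, "x8" : 0}
--     resList = []
--     lstOfw = list(dicOfw.values())
--     for i1 in range(0, 2):
--         for i2 in range(0, 2):
--             for i3 in range(0, 2):
--                 for i4 in range(0, 2):
--                     for i5 in range(0, 2):
--                         for i6 in range(0, 2):
--                             for i7 in range(0, 2):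
--                                 for i8 in range(0, 2):
--                                     dicOfValue["x1"] = i1
--                                     dicOfValue["x2"] = i2
--                                     dicOfValue["x3"] = i3
--                                     dicOfValue["x4"] = i4
--                                     dicOfValue["x5"] = i5
--                                     dicOfValue["x6"] = i6
--                                     dicOfValue["x7"] = i7
--                                     dicOfValue["x8"] = i8
--                                     lstOfValue = list(dicOfValue.values())
--                                     for i in range(len(dicOfw)):
--                                         resList.append((lstOfw[i] + lstOfValue[i]) % 2)
--     return resList
-- ===== SOURCE B (Python) =====
-- def EightVarsAddMol(dicOfw):
--     lstOfw = list(dicOfw.values())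
--     resList = []
--     for mask in range(256):
--         # MSB-first 8-bit expansion of mask: bits[0] = i1, ..., bits[7] = i8
--         bits = [mask // 2 ** (7 - k) % 2 for k in range(8)]
--         for i in range(len(dicOfw)):
--             resList.append((lstOfw[i] + bits[i]) % 2)
--     return resList
-- ===== Notes on version B (the rewrite author's own statement) =====
-- stated objective: simpler
-- what changed: Replaces the eight nested 0/1 loops with a single loop over range(256), expanding each mask MSB-first into the 8-bit assignment via arithmetic instead of maintaining and re-reading the x1..x8 dict.
import Mathlib
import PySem

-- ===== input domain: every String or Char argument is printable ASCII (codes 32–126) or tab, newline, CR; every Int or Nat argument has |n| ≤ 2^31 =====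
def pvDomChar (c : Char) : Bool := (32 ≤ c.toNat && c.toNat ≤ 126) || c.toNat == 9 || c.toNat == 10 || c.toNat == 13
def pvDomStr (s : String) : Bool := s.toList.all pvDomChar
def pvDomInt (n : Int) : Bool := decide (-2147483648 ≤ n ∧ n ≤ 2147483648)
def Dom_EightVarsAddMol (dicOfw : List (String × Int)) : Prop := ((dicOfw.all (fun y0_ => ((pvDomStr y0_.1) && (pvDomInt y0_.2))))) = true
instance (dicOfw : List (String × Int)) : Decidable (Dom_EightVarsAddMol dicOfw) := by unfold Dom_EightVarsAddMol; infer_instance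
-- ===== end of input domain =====

-- B replaces A's eight nested 0/1 loops by a single loop over range(256) whose mask is expanded
-- MSB-first into the 8-bit assignment (objective: simpler); return values agree on all inputs where A returns.


-- ===== PORT A =====
-- Literal transliteration of A's eight nested loops over range(0,2), one helper def per loop level
-- (split only to keep elaboration fast; each helper is exactly its loop). dicOfValue has all eight keys
-- overwritten by the eight assignments each innermost iteration, so threading it across iterations is the
-- identity and it is rebuilt from its initial value; lstOfw[i] / lstOfValue[i] are in range under
-- Pre_, ported with pyGetD.
def pvDicOfValue0 : PySem.Dict String Int :=
  PySem.Dict.ofList [("x1", 0), ("x2", 0), ("x3", 0), ("x4", 0), ("x5", 0), ("x6", 0), ("x7", 0), ("x8", 0)]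

def pvLoop8 (lstOfw : List Int) (n i1 i2 i3 i4 i5 i6 i7 : Int) (resList : List Int) : List Int :=
  (PySem.List.pyRange 0 2 1).foldl (fun resList i8 =>
    let d := ((((((((pvDicOfValue0.insert "x1" i1).insert "x2" i2).insert "x3" i3).insert "x4" i4).insert "x5" i5).insert "x6" i6).insert "x7" i7).insert "x8" i8)
    let lstOfValue := d.values
    (PySem.List.pyRange 0 n 1).foldl (fun resList i =>
      resList ++ [PySem.Int.mod (PySem.List.pyGetD lstOfw i 0 + PySem.List.pyGetD lstOfValue i 0) 2]) resList) resList

def pvLoop7 (lstOfw : List Int) (n i1 i2 i3 i4 i5 i6 : Int) (resList : List Int) : List Int :=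
  (PySem.List.pyRange 0 2 1).foldl (fun resList i7 => pvLoop8 lstOfw n i1 i2 i3 i4 i5 i6 i7 resList) resList

def pvLoop6 (lstOfw : List Int) (n i1 i2 i3 i4 i5 : Int) (resList : List Int) : List Int :=
  (PySem.List.pyRange 0 2 1).foldl (fun resList i6 => pvLoop7 lstOfw n i1 i2 i3 i4 i5 i6 resList) resList

def pvLoop5 (lstOfw : List Int) (n i1 i2 i3 i4 : Int) (resList : List Int) : List Int :=
  (PySem.List.pyRange 0 2 1).foldl (fun resList i5 => pvLoop6 lstOfw n i1 i2 i3 i4 i5 resList) resList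

def pvLoop4 (lstOfw : List Int) (n i1 i2 i3 : Int) (resList : List Int) : List Int :=
  (PySem.List.pyRange 0 2 1).foldl (fun resList i4 => pvLoop5 lstOfw n i1 i2 i3 i4 resList) resList

def pvLoop3 (lstOfw : List Int) (n i1 i2 : Int) (resList : List Int) : List Int :=
  (PySem.List.pyRange 0 2 1).foldl (fun resList i3 => pvLoop4 lstOfw n i1 i2 i3 resList) resList

def pvLoop2 (lstOfw : List Int) (n i1 : Int) (resList : List Int) : List Int :=
  (PySem.List.pyRange 0 2 1).foldl (fun resList i2 => pvLoop3 lstOfw n i1 i2 resList) resList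

def pvLoop1 (lstOfw : List Int) (n : Int) (resList : List Int) : List Int :=
  (PySem.List.pyRange 0 2 1).foldl (fun resList i1 => pvLoop2 lstOfw n i1 resList) resList

def EightVarsAddMol (dicOfw : List (String × Int)) : List Int :=
  pvLoop1 (PySem.Dict.ofList dicOfw).values ((PySem.Dict.ofList dicOfw).size : Int) []

-- ===== PORT B =====
-- 2 ** (7 - k) for k in range(8): the exponent is a nonnegative Int here, ported as (7 - k).toNat (exact).
def EightVarsAddMol_alt (dicOfw : List (String × Int)) : List Int :=
  let lstOfw := (PySem.Dict.ofList dicOfw).values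
  let n : Int := ((PySem.Dict.ofList dicOfw).size : Int)
  (PySem.List.pyRange 0 256 1).foldl (fun resList mask =>
    let bits := (PySem.List.pyRange 0 8 1).map (fun k =>
      PySem.Int.mod (PySem.Int.floordiv mask ((2 : Int) ^ (7 - k).toNat)) 2)
    (PySem.List.pyRange 0 n 1).foldl (fun resList i =>
      resList ++ [PySem.Int.mod (PySem.List.pyGetD lstOfw i 0 + PySem.List.pyGetD bits i 0) 2]) resList) []

-- ===== PRECONDITION & SPEC =====
-- Pre_ excludes dicts with more than 8 keys: there A raises IndexError (lstOfValue has only 8 entries), and B does too.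
def Pre_EightVarsAddMol (dicOfw : List (String × Int)) : Prop :=
  (PySem.Dict.ofList dicOfw).size ≤ 8
instance (dicOfw : List (String × Int)) : Decidable (Pre_EightVarsAddMol dicOfw) := by unfold Pre_EightVarsAddMol; infer_instance
def pvWitness_EightVarsAddMol : (List (String × Int)) := [("a", 1), ("b", 0)]
def Spec_EightVarsAddMol (dicOfw : List (String × Int)) (out : List Int) : Prop := out = EightVarsAddMol_alt dicOfw
instance (dicOfw : List (String × Int)) (out : List Int) : Decidable (Spec_EightVarsAddMol dicOfw out) := by unfold Spec_EightVarsAddMol; infer_instance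

-- ===== CLAIM (what is proved, stated in full; the proofs are below) =====
def Claim_equal_EightVarsAddMol : Prop := ∀ (dicOfw : List (String × Int)), Dom_EightVarsAddMol dicOfw → Pre_EightVarsAddMol dicOfw → Spec_EightVarsAddMol dicOfw (EightVarsAddMol dicOfw)

-- ===== LEMMAS AND PROOFS =====

-- the shared inner loop: append (w[i] + bits[i]) % 2 for i in range(n) to the accumulator
def pvG (w : List Int) (n : Int) : List Int → List Int → List Int :=
  fun resList bits =>
    (PySem.List.pyRange 0 n 1).foldl (fun resList i =>
      resList ++ [PySem.Int.mod (PySem.List.pyGetD w i 0 + PySem.List.pyGetD bits i 0) 2]) resList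

-- the assignment vector A's innermost body reads off its dict
def pvValsA (i1 i2 i3 i4 i5 i6 i7 i8 : Int) : List Int :=
  ((((((((pvDicOfValue0.insert "x1" i1).insert "x2" i2).insert "x3" i3).insert "x4" i4).insert "x5" i5).insert "x6" i6).insert "x7" i7).insert "x8" i8).values

-- B's MSB-first bit expansion of a mask
def pvBitsB (mask : Int) : List Int :=
  (PySem.List.pyRange 0 8 1).map (fun k =>
    PySem.Int.mod (PySem.Int.floordiv mask ((2 : Int) ^ (7 - k).toNat)) 2)

-- A's sequence of 256 assignment vectors, in nesting order
def pvAssignsA : List (List Int) :=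
  (PySem.List.pyRange 0 2 1).flatMap fun i1 =>
    (PySem.List.pyRange 0 2 1).flatMap fun i2 =>
      (PySem.List.pyRange 0 2 1).flatMap fun i3 =>
        (PySem.List.pyRange 0 2 1).flatMap fun i4 =>
          (PySem.List.pyRange 0 2 1).flatMap fun i5 =>
            (PySem.List.pyRange 0 2 1).flatMap fun i6 =>
              (PySem.List.pyRange 0 2 1).flatMap fun i7 =>
                (PySem.List.pyRange 0 2 1).map fun i8 => pvValsA i1 i2 i3 i4 i5 i6 i7 i8

lemma pvA_eq (dicOfw : List (String × Int)) :
    EightVarsAddMol dicOfw =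
      pvAssignsA.foldl (pvG (PySem.Dict.ofList dicOfw).values ((PySem.Dict.ofList dicOfw).size : Int)) [] := by
  unfold EightVarsAddMol pvLoop1 pvLoop2 pvLoop3 pvLoop4 pvLoop5 pvLoop6 pvLoop7 pvLoop8 pvAssignsA pvG pvValsA
  simp only [List.foldl_flatMap, List.foldl_map]

lemma pvB_eq (dicOfw : List (String × Int)) :
    EightVarsAddMol_alt dicOfw =
      ((PySem.List.pyRange 0 256 1).map pvBitsB).foldl
        (pvG (PySem.Dict.ofList dicOfw).values ((PySem.Dict.ofList dicOfw).size : Int)) [] := by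
  unfold EightVarsAddMol_alt pvBitsB pvG
  simp only [List.foldl_map]

-- the two enumerations produce the same 256 assignment vectors in the same order
set_option maxRecDepth 16384 in
lemma pvAssigns_eq : pvAssignsA = (PySem.List.pyRange 0 256 1).map pvBitsB := by decide

-- ===== VERDICT (by name: the statement is the Claim_ definition above) =====
theorem EightVarsAddMol_spec : Claim_equal_EightVarsAddMol := by
  intro dicOfw _ _
  unfold Spec_EightVarsAddMol
  rw [pvA_eq, pvB_eq, pvAssigns_eq]
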